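-- pv_equiv track=rewrite | github.com/go13209/algorithm | 프로그래머스/lv0/120843. 공 던지기/공 던지기.py | solution
-- ===== SOURCE A (Python) =====
-- def solution(numbers, k):
--     cnt = 1
--     idx = 0
--     while cnt != k:
--         cnt += 1
--         idx += 2
--         if idx >= len(numbers):
--             idx -= len(numbers)
--
--     return numbers[idx]
-- ===== SOURCE B (Python) =====
-- def solution(numbers, k):
--     return numbers[2 * (k - 1) % len(numbers)]
-- ===== Notes on version B (the rewrite author's own statement) =====
-- stated objective: faster
-- what changed: replaces the k-1-step simulation loop with the closed-form index 2*(k-1) % len(numbers)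
-- outside the precondition, e.g. on solution([1, 2], 0): A does not finish within the time limit, B returns 1; on solution([5], 2): A raises IndexError, B returns 5
import Mathlib
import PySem

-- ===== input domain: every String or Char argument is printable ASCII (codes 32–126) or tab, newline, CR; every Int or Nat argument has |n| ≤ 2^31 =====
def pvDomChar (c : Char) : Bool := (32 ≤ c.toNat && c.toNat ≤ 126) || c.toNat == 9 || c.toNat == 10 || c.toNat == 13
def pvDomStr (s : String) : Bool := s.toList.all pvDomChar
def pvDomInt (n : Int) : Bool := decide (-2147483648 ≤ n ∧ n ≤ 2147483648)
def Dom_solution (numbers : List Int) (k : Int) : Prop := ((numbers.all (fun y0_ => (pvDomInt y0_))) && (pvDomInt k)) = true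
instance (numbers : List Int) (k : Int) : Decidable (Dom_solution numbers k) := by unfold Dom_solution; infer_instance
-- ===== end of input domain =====

-- B replaces A's k-1-step simulation loop by the closed-form index 2*(k-1) % len(numbers) (faster).


-- ===== PORT A =====
-- the while loop; the final 'else idx' branch only totalizes the divergence k < cnt (outside Pre_)
def solutionLoop (numbers : List Int) (k cnt idx : Int) : Int :=
  if cnt = k then idx
  else if _h : cnt < k then
    let idx2 := idx + 2
    solutionLoop numbers k (cnt + 1) (if idx2 ≥ (numbers.length : Int) then idx2 - numbers.length else idx2)
  else idx
termination_by (k - cnt).toNat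
decreasing_by omega

def solution (numbers : List Int) (k : Int) : Int :=
  (PySem.List.pyGet? numbers (solutionLoop numbers k 1 0)).getD 0

-- ===== PORT B =====
def solution_alt (numbers : List Int) (k : Int) : Int :=
  (PySem.List.pyGet? numbers (PySem.Int.mod (2 * (k - 1)) numbers.length)).getD 0

-- ===== PRECONDITION & SPEC =====
-- A diverges for k < 1, and for a singleton list with k ≥ 2 (or an empty list) its final index is
-- out of range (IndexError); Pre_ admits exactly the inputs on which A returns.
def Pre_solution (numbers : List Int) (k : Int) : Prop :=
  1 ≤ k ∧ (2 ≤ numbers.length ∨ (k = 1 ∧ numbers.length = 1))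
instance (numbers : List Int) (k : Int) : Decidable (Pre_solution numbers k) := by
  unfold Pre_solution; infer_instance
def pvWitness_solution : List Int × Int := ([1, 2, 3], 5)

def Spec_solution (numbers : List Int) (k : Int) (out : Int) : Prop := out = solution_alt numbers k
instance (numbers : List Int) (k : Int) (out : Int) : Decidable (Spec_solution numbers k out) := by unfold Spec_solution; infer_instance

-- ===== CLAIM (what is proved, stated in full; the proofs are below) =====
def Claim_equal_solution : Prop := ∀ (numbers : List Int) (k : Int), Dom_solution numbers k → Pre_solution numbers k → Spec_solution numbers k (solution numbers k)

-- ===== LEMMAS AND PROOFS =====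
lemma solutionLoop_eq (numbers : List Int) (k : Int) (hL : 2 ≤ (numbers.length : Int)) :
    ∀ (cnt idx : Int), cnt ≤ k → 0 ≤ idx → idx < (numbers.length : Int) →
      solutionLoop numbers k cnt idx = (idx + 2 * (k - cnt)) % (numbers.length : Int) := by
  intro cnt idx hck h0 hlt
  induction hn : (k - cnt).toNat generalizing cnt idx with
  | zero =>
      have : cnt = k := by omega
      subst this
      rw [solutionLoop, if_pos rfl, sub_self, mul_zero, add_zero, Int.emod_eq_of_lt h0 hlt]
  | succ n ih =>
      have hne : cnt ≠ k := by omega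
      have hck' : cnt < k := by omega
      rw [solutionLoop, if_neg hne, dif_pos hck']
      set L : Int := (numbers.length : Int) with hLdef
      by_cases hc : idx + 2 ≥ L
      · simp only [if_pos hc]
        rw [ih (cnt + 1) (idx + 2 - L) (by omega) (by omega) (by omega) (by omega)]
        have : idx + 2 - L + 2 * (k - (cnt + 1)) = (idx + 2 * (k - cnt)) - L := by ring
        rw [this, Int.sub_emod_right]
      · simp only [if_neg hc]
        rw [ih (cnt + 1) (idx + 2) (by omega) (by omega) (by omega) (by omega)]
        congr 1
        ring

-- ===== VERDICT (by name: the statement is the Claim_ definition above) =====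
theorem solution_spec : Claim_equal_solution := by
  intro numbers k _ hpre
  unfold Spec_solution solution solution_alt
  obtain ⟨hk, hcase⟩ := hpre
  rcases hcase with hL | ⟨hk1, hL1⟩
  · have hL' : 2 ≤ (numbers.length : Int) := by exact_mod_cast hL
    rw [solutionLoop_eq numbers k hL' 1 0 hk (by omega) (by omega)]
    rw [PySem.Int.mod_eq_emod_of_pos (by omega)]
    norm_num
  · subst hk1
    rw [solutionLoop]
    simp [PySem.Int.mod, hL1]
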